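-- pv_equiv track=rewrite | github.com/SamMarckson/Python-Practice | Adding diagonal products.py | sum_prod_diags
-- ===== SOURCE A (Python) =====
-- def sum_prod_diags(matrix):
--
--     # CÁLCULO DAS DIAGONAIS ACIMA DA DIAGONAL PRINCIPAL, INCLUINDO A DIAGONAL PRINCIPAL
--     repsDiagSup = 0
--     cont = 0
--     prod1 = []
--     while repsDiagSup < len(matrix):
--         mult = 1
--         for i in range(0, len(matrix) - cont):
--             mult *= matrix[i][i+cont]
--         prod1.append(mult)
--         cont += 1
--         repsDiagSup += 1
--
--     # CÁLCULO DAS DIAGONAIS ABAIXO DA DIAGONAL PRINCIPAL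
--     repsDiagInf = 1
--     cont = 1
--     while repsDiagInf < len(matrix):
--         mult = 1
--         for i in range(0, len(matrix) - cont):
--             mult *= matrix[i + cont][i]
--         prod1.append(mult)
--         cont += 1
--         repsDiagInf += 1
--
--     # CÁLCULO DAS DIAGONAIS ACIMA DA DIAGONAL SECUNDÁRIA, INCLUINDO A DIAGONAL SECUNDÁRIA
--     repsDiagSupEsq = 0
--     cont = 0
--     prod2 = []
--     while repsDiagSupEsq < len(matrix):
--         mult = 1
--         cont2 = 1 + repsDiagSupEsq
--         for i in range(0, len(matrix) - cont):
--             mult *= matrix[i][len(matrix) - cont2]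
--             cont2 += 1
--         prod2.append(mult)
--         cont += 1
--         repsDiagSupEsq += 1
--
--     # CÁLCULO DAS DIAGONAIS ABAIXO DA DIAGONAL SECUNDÁRIA
--     repsDiagInfEsq = 1
--     cont = 1
--     while repsDiagInfEsq < len(matrix):
--         mult = 1
--         cont2 = repsDiagInfEsq
--         cont3 = 1
--         for i in range(0, len(matrix) - cont):
--             mult *= matrix[cont2][len(matrix) - cont3]
--             cont2 += 1
--             cont3 += 1
--         prod2.append(mult)
--         cont += 1
--         repsDiagInfEsq += 1
--
--     return sum(prod1) - sum(prod2)
-- ===== SOURCE B (Python) =====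
-- def sum_prod_diags(matrix):
--     n = len(matrix)
--     total = 0
--     for d in range(1 - n, n):
--         p = 1
--         a = 1
--         for i in range(max(d, 0), min(n, n + d)):
--             p *= matrix[i][i - d]
--             a *= matrix[i][n - 1 - (i - d)]
--         total += p - a
--     return total
-- ===== Notes on version B (the rewrite author's own statement) =====
-- stated objective: simpler
-- what changed: Replaces A's four separate diagonal-sweeping while-loops (each with its own hand-maintained offset counters and intermediate product lists) by a single loop over the diagonal offset d that computes the d-th primary and anti-diagonal products together and accumulates their difference directly.
import Mathlib
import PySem

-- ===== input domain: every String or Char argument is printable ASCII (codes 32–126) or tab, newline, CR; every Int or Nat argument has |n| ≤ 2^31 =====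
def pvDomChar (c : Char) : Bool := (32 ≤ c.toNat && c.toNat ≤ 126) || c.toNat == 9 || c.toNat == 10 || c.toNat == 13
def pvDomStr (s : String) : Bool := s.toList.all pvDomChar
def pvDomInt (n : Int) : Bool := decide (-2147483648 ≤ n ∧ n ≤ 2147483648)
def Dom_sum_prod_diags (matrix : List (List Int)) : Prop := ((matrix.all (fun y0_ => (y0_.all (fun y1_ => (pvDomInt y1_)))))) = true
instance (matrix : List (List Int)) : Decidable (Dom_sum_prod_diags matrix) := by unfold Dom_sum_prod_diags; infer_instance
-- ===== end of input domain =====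

-- B replaces A's four diagonal-sweeping while-loops by one loop over the diagonal offset d that
-- computes the d-th primary and anti-diagonal products together in a single inner loop (objective: simpler).

-- shared primitive: matrix[i][j] (total form; Pre_ keeps every access in range, exactly as in Python)
def pvIdx (matrix : List (List Int)) (i j : Int) : Int :=
  PySem.List.pyGetD (PySem.List.pyGetD matrix i []) j 0

-- ===== PORT A =====
def sum_prod_diags (matrix : List (List Int)) : Int :=
  let n := PySem.List.len matrix
  -- diagonals on/above the main diagonal (state: cont, prod1)
  let s1 := (PySem.List.pyRange 0 n 1).foldl (fun (st : Int × List Int) _reps =>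
      let mult := (PySem.List.pyRange 0 (n - st.1) 1).foldl
          (fun m i => m * pvIdx matrix i (i + st.1)) 1
      (st.1 + 1, st.2 ++ [mult])) (0, [])
  -- diagonals below the main diagonal
  let s2 := (PySem.List.pyRange 1 n 1).foldl (fun (st : Int × List Int) _reps =>
      let mult := (PySem.List.pyRange 0 (n - st.1) 1).foldl
          (fun m i => m * pvIdx matrix (i + st.1) i) 1
      (st.1 + 1, st.2 ++ [mult])) (1, s1.2)
  let prod1 := s2.2
  -- anti-diagonals on/above the secondary diagonal (inner state: mult, cont2)
  let s3 := (PySem.List.pyRange 0 n 1).foldl (fun (st : Int × List Int) reps =>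
      let inner := (PySem.List.pyRange 0 (n - st.1) 1).foldl
          (fun (p : Int × Int) i => (p.1 * pvIdx matrix i (n - p.2), p.2 + 1)) (1, 1 + reps)
      (st.1 + 1, st.2 ++ [inner.1])) (0, [])
  -- anti-diagonals below the secondary diagonal (inner state: mult, cont2, cont3)
  let s4 := (PySem.List.pyRange 1 n 1).foldl (fun (st : Int × List Int) reps =>
      let inner := (PySem.List.pyRange 0 (n - st.1) 1).foldl
          (fun (p : Int × Int × Int) _i => (p.1 * pvIdx matrix p.2.1 (n - p.2.2), p.2.1 + 1, p.2.2 + 1))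
          (1, reps, 1)
      (st.1 + 1, st.2 ++ [inner.1])) (1, s3.2)
  let prod2 := s4.2
  prod1.sum - prod2.sum

-- ===== PORT B =====
def sum_prod_diags_alt (matrix : List (List Int)) : Int :=
  let n := PySem.List.len matrix
  (PySem.List.pyRange (1 - n) n 1).foldl (fun total d =>
    let pa := (PySem.List.pyRange (max d 0) (min n (n + d)) 1).foldl
        (fun (pa : Int × Int) i =>
          (pa.1 * pvIdx matrix i (i - d), pa.2 * pvIdx matrix i (n - 1 - (i - d)))) (1, 1)
    total + (pa.1 - pa.2)) 0

-- ===== PRECONDITION & SPEC =====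
-- Pre_ excludes ragged matrices with a row shorter than the number of rows, on which Python A raises IndexError.
def Pre_sum_prod_diags (matrix : List (List Int)) : Prop :=
  ∀ row ∈ matrix, matrix.length ≤ row.length
instance (matrix : List (List Int)) : Decidable (Pre_sum_prod_diags matrix) := by
  unfold Pre_sum_prod_diags; infer_instance
def pvWitness_sum_prod_diags : List (List Int) := [[1, 2], [3, 4]]

def Spec_sum_prod_diags (matrix : List (List Int)) (out : Int) : Prop := out = sum_prod_diags_alt matrix
instance (matrix : List (List Int)) (out : Int) : Decidable (Spec_sum_prod_diags matrix out) := by unfold Spec_sum_prod_diags; infer_instance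

-- ===== CLAIM (what is proved, stated in full; the proofs are below) =====
def Claim_equal_sum_prod_diags : Prop := ∀ (matrix : List (List Int)), Dom_sum_prod_diags matrix → Pre_sum_prod_diags matrix → Spec_sum_prod_diags matrix (sum_prod_diags matrix)

-- ===== LEMMAS AND PROOFS =====

-- a '*=' loop is the product of the mapped list
theorem pv_foldl_mul (g : Int → Int) (l : List Int) (a : Int) :
    l.foldl (fun m x => m * g x) a = a * (l.map g).prod := by
  induction l generalizing a with
  | nil => simp
  | cons x t ih => simp [ih, mul_assoc]

-- append-with-counter loop: the list component collects the body over the range (cont = range element)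
theorem pv_loop_append_aux (g : Int → Int → Int) (k : Nat) : ∀ (a b : Int), (b - a).toNat = k → ∀ (acc : List Int),
    ((PySem.List.pyRange a b 1).foldl
        (fun (st : Int × List Int) (r : Int) => (st.1 + 1, st.2 ++ [g st.1 r])) (a, acc)).2
      = acc ++ (PySem.List.pyRange a b 1).map (fun r => g r r) := by
  induction k with
  | zero =>
    intro a b hk acc
    rw [PySem.List.pyRange_one_eq_nil (by omega)]
    simp
  | succ k ih =>
    intro a b hk acc
    rw [PySem.List.pyRange_one_cons (by omega)]
    simp only [List.foldl_cons, List.map_cons]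
    rw [ih (a + 1) b (by omega) (acc ++ [g a a])]
    simp

theorem pv_loop_append (g : Int → Int → Int) (a b : Int) (acc : List Int) :
    ((PySem.List.pyRange a b 1).foldl
        (fun (st : Int × List Int) (r : Int) => (st.1 + 1, st.2 ++ [g st.1 r])) (a, acc)).2
      = acc ++ (PySem.List.pyRange a b 1).map (fun r => g r r) :=
  pv_loop_append_aux g _ a b rfl acc

-- inner loop of A's third sweep: running column counter
theorem pv_loop_mul_cnt_aux (f : Int → Int → Int) (k : Nat) : ∀ (a b : Int), (b - a).toNat = k → ∀ (m c : Int),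
    ((PySem.List.pyRange a b 1).foldl
        (fun (p : Int × Int) i => (p.1 * f i p.2, p.2 + 1)) (m, c)).1
      = m * ((PySem.List.pyRange a b 1).map (fun i => f i (c + (i - a)))).prod := by
  induction k with
  | zero =>
    intro a b hk m c
    rw [PySem.List.pyRange_one_eq_nil (by omega)]
    simp
  | succ k ih =>
    intro a b hk m c
    rw [PySem.List.pyRange_one_cons (by omega)]
    simp only [List.foldl_cons, List.map_cons, List.prod_cons]
    rw [ih (a + 1) b (by omega) (m * f a c) (c + 1)]
    have hmap : (PySem.List.pyRange (a + 1) b 1).map (fun i => f i (c + 1 + (i - (a + 1))))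
        = (PySem.List.pyRange (a + 1) b 1).map (fun i => f i (c + (i - a))) := by
      apply List.map_congr_left
      intro x _
      have h1 : c + 1 + (x - (a + 1)) = c + (x - a) := by ring
      rw [h1]
    rw [hmap]
    have h0 : c + (a - a) = c := by ring
    rw [h0, mul_assoc]

theorem pv_loop_mul_cnt (f : Int → Int → Int) (a b m c : Int) :
    ((PySem.List.pyRange a b 1).foldl
        (fun (p : Int × Int) i => (p.1 * f i p.2, p.2 + 1)) (m, c)).1
      = m * ((PySem.List.pyRange a b 1).map (fun i => f i (c + (i - a)))).prod :=
  pv_loop_mul_cnt_aux f _ a b rfl m c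

-- inner loop of A's fourth sweep: two running counters, range element ignored
theorem pv_loop_mul_cnt2 (f : Int → Int → Int) (l : List Int) : ∀ (m c2 c3 : Int),
    (l.foldl (fun (p : Int × Int × Int) (_ : Int) =>
        (p.1 * f p.2.1 p.2.2, p.2.1 + 1, p.2.2 + 1)) (m, c2, c3)).1
      = m * ((List.range l.length).map (fun k : Nat => f (c2 + k) (c3 + k))).prod := by
  induction l with
  | nil => intro m c2 c3; simp
  | cons x t ih =>
    intro m c2 c3
    simp only [List.foldl_cons]
    rw [ih (m * f c2 c3) (c2 + 1) (c3 + 1)]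
    conv_rhs => rw [List.length_cons, List.range_succ_eq_map]
    simp only [List.map_cons, List.map_map, List.prod_cons, Nat.cast_zero, add_zero]
    have hmap : List.map ((fun k : Nat => f (c2 + k) (c3 + k)) ∘ Nat.succ) (List.range t.length)
        = List.map (fun k : Nat => f (c2 + 1 + k) (c3 + 1 + k)) (List.range t.length) := by
      apply List.map_congr_left
      intro y _
      show f (c2 + (y + 1 : Nat)) (c3 + (y + 1 : Nat)) = f (c2 + 1 + y) (c3 + 1 + y)
      have h1 : c2 + ((y + 1 : Nat) : Int) = c2 + 1 + y := by push_cast; ring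
      have h2 : c3 + ((y + 1 : Nat) : Int) = c3 + 1 + y := by push_cast; ring
      rw [h1, h2]
    rw [hmap]
    ring

-- A's loop with two independent product accumulators is a pair of products
theorem pv_pair_mul (F G : Int → Int) (l : List Int) :
    l.foldl (fun (pa : Int × Int) i => (pa.1 * F i, pa.2 * G i)) (1, 1)
      = ((l.map F).prod, (l.map G).prod) := by
  rw [PySem.List.foldl_prod_mk (f := fun m i => m * F i) (g := fun m i => m * G i)]
  rw [pv_foldl_mul F l 1, pv_foldl_mul G l 1]
  simp

-- A reduced to a closed form: four sums of diagonal products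
theorem portA_eq (matrix : List (List Int)) :
    sum_prod_diags matrix
      = (((PySem.List.pyRange 0 (PySem.List.len matrix) 1).map (fun c =>
            ((PySem.List.pyRange 0 (PySem.List.len matrix - c) 1).map
              (fun i => pvIdx matrix i (i + c))).prod)).sum
        + ((PySem.List.pyRange 1 (PySem.List.len matrix) 1).map (fun c =>
            ((PySem.List.pyRange 0 (PySem.List.len matrix - c) 1).map
              (fun i => pvIdx matrix (i + c) i)).prod)).sum)
        - (((PySem.List.pyRange 0 (PySem.List.len matrix) 1).map (fun r =>
            ((PySem.List.pyRange 0 (PySem.List.len matrix - r) 1).map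
              (fun i => pvIdx matrix i (PySem.List.len matrix - (1 + r + (i - 0))))).prod)).sum
        + ((PySem.List.pyRange 1 (PySem.List.len matrix) 1).map (fun r =>
            ((List.range (PySem.List.len matrix - r - 0).toNat).map
              (fun k : Nat => pvIdx matrix (r + k) (PySem.List.len matrix - (1 + k)))).prod)).sum) := by
  unfold sum_prod_diags
  simp only [pv_foldl_mul, one_mul]
  rw [pv_loop_append (fun c _r => ((PySem.List.pyRange 0 (PySem.List.len matrix - c) 1).map
        (fun x => pvIdx matrix x (x + c))).prod) 0 (PySem.List.len matrix) []]
  rw [pv_loop_append (fun c _r => ((PySem.List.pyRange 0 (PySem.List.len matrix - c) 1).map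
        (fun x => pvIdx matrix (x + c) x)).prod) 1 (PySem.List.len matrix)]
  rw [pv_loop_append (fun c r => ((PySem.List.pyRange 0 (PySem.List.len matrix - c) 1).foldl
        (fun (p : Int × Int) i => (p.1 * pvIdx matrix i (PySem.List.len matrix - p.2), p.2 + 1)) (1, 1 + r)).1)
      0 (PySem.List.len matrix) []]
  rw [pv_loop_append (fun c r => ((PySem.List.pyRange 0 (PySem.List.len matrix - c) 1).foldl
        (fun (p : Int × Int × Int) _i => (p.1 * pvIdx matrix p.2.1 (PySem.List.len matrix - p.2.2), p.2.1 + 1, p.2.2 + 1))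
        (1, r, 1)).1) 1 (PySem.List.len matrix)]
  simp only [List.nil_append, List.sum_append]
  congr 2
  · apply congrArg List.sum; apply List.map_congr_left; intro r _
    rw [pv_loop_mul_cnt (fun i x => pvIdx matrix i (PySem.List.len matrix - x)) 0 (PySem.List.len matrix - r) 1 (1 + r)]
    simp
  · apply congrArg List.sum; apply List.map_congr_left; intro r _
    rw [pv_loop_mul_cnt2 (fun a b => pvIdx matrix a (PySem.List.len matrix - b)) (PySem.List.pyRange 0 (PySem.List.len matrix - r) 1) 1 r 1]
    simp [PySem.List.length_pyRange_one]

-- B reduced to a closed form: one sum of per-offset product differences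
theorem portB_eq (matrix : List (List Int)) :
    sum_prod_diags_alt matrix
      = ((PySem.List.pyRange (1 - PySem.List.len matrix) (PySem.List.len matrix) 1).map (fun d =>
          ((PySem.List.pyRange (max d 0) (min (PySem.List.len matrix) (PySem.List.len matrix + d)) 1).map
            (fun i => pvIdx matrix i (i - d))).prod
          - ((PySem.List.pyRange (max d 0) (min (PySem.List.len matrix) (PySem.List.len matrix + d)) 1).map
            (fun i => pvIdx matrix i (PySem.List.len matrix - 1 - (i - d)))).prod)).sum := by
  unfold sum_prod_diags_alt
  simp only [pv_pair_mul]
  rw [PySem.List.foldl_add]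
  simp

-- bridges between list sums/products over ranges and Finset.range sums/products
theorem pv_sum_list_range (g : Nat → Int) (n : Nat) :
    ((List.range n).map g).sum = ∑ i ∈ Finset.range n, g i := Int.neg_inj.mp rfl

theorem pv_prod_list_range (g : Nat → Int) (n : Nat) :
    ((List.range n).map g).prod = ∏ i ∈ Finset.range n, g i := Int.neg_inj.mp rfl

theorem pv_sum_pyRange (h : Int → Int) (a b : Int) :
    ((PySem.List.pyRange a b 1).map h).sum = ∑ t ∈ Finset.range ((b - a).toNat), h (a + t) := by
  rw [PySem.List.pyRange_one, List.map_map, pv_sum_list_range]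
  rfl

theorem pv_prod_pyRange (h : Int → Int) (a b : Int) :
    ((PySem.List.pyRange a b 1).map h).prod = ∏ t ∈ Finset.range ((b - a).toNat), h (a + t) := by
  rw [PySem.List.pyRange_one, List.map_map, pv_prod_list_range]
  rfl

theorem pv_sum_map_sub (f g : Int → Int) (l : List Int) :
    (l.map (fun x => f x - g x)).sum = (l.map f).sum - (l.map g).sum := by
  induction l with
  | nil => simp
  | cons x t ih => simp [ih]; ring

-- the combinatorial core: A's four diagonal sweeps regroup into B's one sweep over offsets
theorem pv_key (f : Int → Int → Int) (N : Nat) :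
    (((PySem.List.pyRange 0 (N : Int) 1).map (fun c =>
        ((PySem.List.pyRange 0 ((N : Int) - c) 1).map (fun i => f i (i + c))).prod)).sum
      + ((PySem.List.pyRange 1 (N : Int) 1).map (fun c =>
        ((PySem.List.pyRange 0 ((N : Int) - c) 1).map (fun i => f (i + c) i)).prod)).sum)
      - (((PySem.List.pyRange 0 (N : Int) 1).map (fun r =>
        ((PySem.List.pyRange 0 ((N : Int) - r) 1).map (fun i => f i ((N : Int) - (1 + r + (i - 0))))).prod)).sum
      + ((PySem.List.pyRange 1 (N : Int) 1).map (fun r =>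
        ((List.range ((N : Int) - r - 0).toNat).map (fun k : Nat => f (r + k) ((N : Int) - (1 + k)))).prod)).sum)
    = ((PySem.List.pyRange (1 - (N : Int)) (N : Int) 1).map (fun d =>
        ((PySem.List.pyRange (max d 0) (min (N : Int) ((N : Int) + d)) 1).map
          (fun i => f i (i - d))).prod
        - ((PySem.List.pyRange (max d 0) (min (N : Int) ((N : Int) + d)) 1).map
          (fun i => f i ((N : Int) - 1 - (i - d)))).prod)).sum := by
  rcases Nat.eq_zero_or_pos N with h0 | hpos
  · subst h0
    rw [PySem.List.pyRange_one_eq_nil (a := (0:Int)) (by norm_num),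
        PySem.List.pyRange_one_eq_nil (a := (1:Int)) (by norm_num),
        PySem.List.pyRange_one_eq_nil (a := (1 - (0:Nat) : Int)) (by norm_num)]
    simp
  · have hN1 : (1:Int) ≤ (N:Int) := by exact_mod_cast hpos
    rw [pv_sum_map_sub]
    simp only [pv_sum_pyRange, pv_prod_pyRange, pv_prod_list_range]
    simp only [zero_add, sub_zero, Int.toNat_natCast]
    have hcnt : ((N : Int) - (1 - (N : Int))).toNat = N + (N - 1) := by omega
    rw [hcnt, Finset.sum_range_add, Finset.sum_range_add]
    have hP1 : (∑ t ∈ Finset.range N, ∏ k ∈ Finset.range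
          ((min (N:Int) ((N:Int) + (1 - (N:Int) + (t:Int))) - max (1 - (N:Int) + (t:Int)) 0).toNat),
          f (max (1 - (N:Int) + (t:Int)) 0 + (k:Int)) (max (1 - (N:Int) + (t:Int)) 0 + (k:Int) - (1 - (N:Int) + (t:Int))))
        = ∑ c ∈ Finset.range N, ∏ k ∈ Finset.range (((N:Int) - (c:Int)).toNat), f (k:Int) ((k:Int) + (c:Int)) := by
      rw [← Finset.sum_range_reflect]
      apply Finset.sum_congr rfl
      intro j hj
      rw [Finset.mem_range] at hj
      have hd : (1 - (N:Int) + ((N - 1 - j : Nat) : Int)) = -(j:Int) := by omega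
      rw [hd]
      have hmax : max (-(j:Int)) 0 = 0 := by omega
      have hmin : min (N:Int) ((N:Int) + -(j:Int)) = (N:Int) - (j:Int) := by omega
      rw [hmax, hmin]
      rw [show ((N:Int) - (j:Int) - 0).toNat = ((N:Int) - (j:Int)).toNat from by omega]
      apply Finset.prod_congr rfl
      intro k _
      rw [show (0 + (k:Int)) = (k:Int) from by ring,
          show ((k:Int) - -(j:Int)) = (k:Int) + (j:Int) from by ring]
    have hQ1 : (∑ t ∈ Finset.range N, ∏ k ∈ Finset.range
          ((min (N:Int) ((N:Int) + (1 - (N:Int) + (t:Int))) - max (1 - (N:Int) + (t:Int)) 0).toNat),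
          f (max (1 - (N:Int) + (t:Int)) 0 + (k:Int)) ((N:Int) - 1 - (max (1 - (N:Int) + (t:Int)) 0 + (k:Int) - (1 - (N:Int) + (t:Int)))))
        = ∑ r ∈ Finset.range N, ∏ k ∈ Finset.range (((N:Int) - (r:Int)).toNat), f (k:Int) ((N:Int) - (1 + (r:Int) + (k:Int))) := by
      rw [← Finset.sum_range_reflect]
      apply Finset.sum_congr rfl
      intro j hj
      rw [Finset.mem_range] at hj
      have hd : (1 - (N:Int) + ((N - 1 - j : Nat) : Int)) = -(j:Int) := by omega
      rw [hd]
      have hmax : max (-(j:Int)) 0 = 0 := by omega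
      have hmin : min (N:Int) ((N:Int) + -(j:Int)) = (N:Int) - (j:Int) := by omega
      rw [hmax, hmin]
      rw [show ((N:Int) - (j:Int) - 0).toNat = ((N:Int) - (j:Int)).toNat from by omega]
      apply Finset.prod_congr rfl
      intro k _
      rw [show ((N:Int) - 1 - (0 + (k:Int) - -(j:Int))) = ((N:Int) - (1 + (j:Int) + (k:Int))) from by ring,
          show (0 + (k:Int)) = (k:Int) from by ring]
    have hP2 : (∑ t ∈ Finset.range (N - 1), ∏ k ∈ Finset.range
          ((min (N:Int) ((N:Int) + (1 - (N:Int) + ((N + t : Nat):Int))) - max (1 - (N:Int) + ((N + t : Nat):Int)) 0).toNat),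
          f (max (1 - (N:Int) + ((N + t : Nat):Int)) 0 + (k:Int)) (max (1 - (N:Int) + ((N + t : Nat):Int)) 0 + (k:Int) - (1 - (N:Int) + ((N + t : Nat):Int))))
        = ∑ c ∈ Finset.range (N - 1), ∏ k ∈ Finset.range (((N:Int) - (1 + (c:Int))).toNat), f ((k:Int) + (1 + (c:Int))) (k:Int) := by
      apply Finset.sum_congr rfl
      intro t _
      have hd : (1 - (N:Int) + ((N + t : Nat) : Int)) = 1 + (t:Int) := by omega
      rw [hd]
      have hmax : max (1 + (t:Int)) 0 = 1 + (t:Int) := by omega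
      have hmin : min (N:Int) ((N:Int) + (1 + (t:Int))) = (N:Int) := by omega
      rw [hmax, hmin]
      apply Finset.prod_congr rfl
      intro k _
      rw [show (1 + (t:Int) + (k:Int) - (1 + (t:Int))) = (k:Int) from by ring,
          show (1 + (t:Int) + (k:Int)) = ((k:Int) + (1 + (t:Int))) from by ring]
    have hQ2 : (∑ t ∈ Finset.range (N - 1), ∏ k ∈ Finset.range
          ((min (N:Int) ((N:Int) + (1 - (N:Int) + ((N + t : Nat):Int))) - max (1 - (N:Int) + ((N + t : Nat):Int)) 0).toNat),
          f (max (1 - (N:Int) + ((N + t : Nat):Int)) 0 + (k:Int)) ((N:Int) - 1 - (max (1 - (N:Int) + ((N + t : Nat):Int)) 0 + (k:Int) - (1 - (N:Int) + ((N + t : Nat):Int)))))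
        = ∑ r ∈ Finset.range (N - 1), ∏ k ∈ Finset.range (((N:Int) - (1 + (r:Int))).toNat), f (1 + (r:Int) + (k:Int)) ((N:Int) - (1 + (k:Int))) := by
      apply Finset.sum_congr rfl
      intro t _
      have hd : (1 - (N:Int) + ((N + t : Nat) : Int)) = 1 + (t:Int) := by omega
      rw [hd]
      have hmax : max (1 + (t:Int)) 0 = 1 + (t:Int) := by omega
      have hmin : min (N:Int) ((N:Int) + (1 + (t:Int))) = (N:Int) := by omega
      rw [hmax, hmin]
      apply Finset.prod_congr rfl
      intro k _
      rw [show ((N:Int) - 1 - (1 + (t:Int) + (k:Int) - (1 + (t:Int)))) = ((N:Int) - (1 + (k:Int))) from by ring]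
    rw [show ((N:Int) - 1).toNat = N - 1 from by omega]
    rw [hP1, hQ1, hP2, hQ2]

-- ===== VERDICT (by name: the statement is the Claim_ definition above) =====
theorem sum_prod_diags_spec : Claim_equal_sum_prod_diags := by
  intro matrix _dom _pre
  unfold Spec_sum_prod_diags
  rw [portA_eq, portB_eq]
  simp only [PySem.List.len_eq]
  exact pv_key (pvIdx matrix) matrix.length
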